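-- pv_equiv track=rewrite | github.com/theHashiraKhaled/codewars-solutions | Python/4kyu/4kyu_The_observed_PIN.py | get_pins
-- ===== SOURCE A (Python) =====
-- def get_pins(observed):
--   '''TODO: This is your job, detective!'''
--   import itertools
--   digit = []
--   variations = []
--   pins = []
--
--   digit = [x for x in observed if x != " "]
--
--   for elem in digit:
--       if elem == "1":
--           variations.append(["1", "2", "4"])
--       elif elem == "2":
--           variations.append(["2", "1", "3", "5"])
--       elif elem == "3":
--           variations.append(["3", "2", "6"])
--       elif elem == "4":
--           variations.append(["4", "1", "5", "7"])
--       elif elem == "5":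
--           variations.append(["5", "2", "4", "6", "8"])
--       elif elem == "6":
--           variations.append(["6", "3", "5", "9"])
--       elif elem == "7":
--           variations.append(["7", "4", "8"])
--       elif elem == "8":
--           variations.append(["8", "5", "7", "9", "0"])
--       elif elem == "9":
--           variations.append(["9", "6", "8"])
--       elif elem == "0":
--           variations.append(["0", "8"])
--
--   # FAIRE DEUX BOUCLE FOR QUI VONT TOURNER DANS UNE LISTE A ET B, ET APPARIER AU FUR ET A MESURE
--   if len(variations) == 1:
--       return variations[0]
--
--   temp = list(itertools.product(*variations))
--   for item in temp:
--       pins.append("".join(str(e) for e in item))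
--   return pins
-- ===== SOURCE B (Python) =====
-- ADJ = {
--     '1': ['1', '2', '4'],
--     '2': ['2', '1', '3', '5'],
--     '3': ['3', '2', '6'],
--     '4': ['4', '1', '5', '7'],
--     '5': ['5', '2', '4', '6', '8'],
--     '6': ['6', '3', '5', '9'],
--     '7': ['7', '4', '8'],
--     '8': ['8', '5', '7', '9', '0'],
--     '9': ['9', '6', '8'],
--     '0': ['0', '8'],
-- }
--
-- def get_pins(observed):
--     # Mixed-radix index decoding: enumerate output positions 0..total-1 and
--     # decode each index with divmod into one character per digit position.
--     lists = [ADJ[c] for c in observed if c in ADJ]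
--     total = 1
--     for l in lists:
--         total *= len(l)
--     pins = []
--     for i in range(total):
--         q = i
--         chars = []
--         for l in reversed(lists):
--             q, r = divmod(q, len(l))
--             chars.append(l[r])
--         pins.append(''.join(reversed(chars)))
--     return pins
-- ===== Notes on version B (the rewrite author's own statement) =====
-- stated objective: alternative
-- what changed: Instead of expanding a Cartesian product (itertools.product + per-item generator join), B counts the outputs: it computes total = product of the adjacency-list sizes and, for each index i in range(total), decodes i by repeated divmod (mixed-radix) into one character per digit position, which reproduces product order and handles the empty and single-digit cases uniformly.
import Mathlib
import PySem

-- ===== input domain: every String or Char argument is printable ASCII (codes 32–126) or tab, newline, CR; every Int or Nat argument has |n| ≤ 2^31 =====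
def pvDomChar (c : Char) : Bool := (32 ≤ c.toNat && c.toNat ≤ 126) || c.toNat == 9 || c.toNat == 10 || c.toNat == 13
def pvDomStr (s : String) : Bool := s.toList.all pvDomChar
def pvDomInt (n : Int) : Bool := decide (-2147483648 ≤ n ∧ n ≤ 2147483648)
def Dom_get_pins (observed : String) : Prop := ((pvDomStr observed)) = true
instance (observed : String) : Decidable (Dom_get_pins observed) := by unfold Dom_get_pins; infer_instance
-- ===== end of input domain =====

-- B replaces itertools.product expansion with mixed-radix index decoding: it
-- enumerates i in range(product of list sizes) and decodes each i by divmod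
-- into one character per position; objective: alternative (same cost).


-- ===== PORT A =====
-- the body of A's for-loop over digit: the elif chain appending to variations
def stepVar (vs : List (List String)) (elem : Char) : List (List String) :=
  if elem = '1' then vs ++ [["1", "2", "4"]]
  else if elem = '2' then vs ++ [["2", "1", "3", "5"]]
  else if elem = '3' then vs ++ [["3", "2", "6"]]
  else if elem = '4' then vs ++ [["4", "1", "5", "7"]]
  else if elem = '5' then vs ++ [["5", "2", "4", "6", "8"]]
  else if elem = '6' then vs ++ [["6", "3", "5", "9"]]
  else if elem = '7' then vs ++ [["7", "4", "8"]]
  else if elem = '8' then vs ++ [["8", "5", "7", "9", "0"]]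
  else if elem = '9' then vs ++ [["9", "6", "8"]]
  else if elem = '0' then vs ++ [["0", "8"]]
  else vs

-- itertools.product(*variations), as a list of tuples (here: lists), leftmost slowest
def pyProduct (ls : List (List String)) : List (List String) :=
  match ls with
  | [] => [[]]
  | l :: rest => l.flatMap (fun x => (pyProduct rest).map (fun t => x :: t))

-- "".join(...)
def pyJoin (l : List String) : String := l.foldl (· ++ ·) ""

def get_pins (observed : String) : List String :=
  let digit := observed.toList.filter (fun x => x ≠ ' ')
  let variations := digit.foldl stepVar []
  if variations.length = 1 then variations.headD []
  else
    let temp := pyProduct variations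
    temp.foldl (fun pins item => pins ++ [pyJoin item]) []

-- ===== PORT B =====
-- the ADJ dict as a lookup: none = key absent ('c in ADJ' fails)
def adjB (c : Char) : Option (List String) :=
  if c = '1' then some ["1", "2", "4"]
  else if c = '2' then some ["2", "1", "3", "5"]
  else if c = '3' then some ["3", "2", "6"]
  else if c = '4' then some ["4", "1", "5", "7"]
  else if c = '5' then some ["5", "2", "4", "6", "8"]
  else if c = '6' then some ["6", "3", "5", "9"]
  else if c = '7' then some ["7", "4", "8"]
  else if c = '8' then some ["8", "5", "7", "9", "0"]
  else if c = '9' then some ["9", "6", "8"]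
  else if c = '0' then some ["0", "8"]
  else none

-- B: total = product of the list sizes; each i < total is decoded by the inner
-- divmod loop over reversed(lists) (l[r] is always in range since every
-- adjacency list is nonempty, so getD's default is never used).
def get_pins_alt (observed : String) : List String :=
  let lists := observed.toList.filterMap adjB
  let total := lists.foldl (fun t l => t * l.length) 1
  (List.range total).map (fun i =>
    let st := lists.reverse.foldl
      (fun (st : Nat × List String) l =>
        (st.1 / l.length, st.2 ++ [l.getD (st.1 % l.length) ""])) (i, [])
    pyJoin st.2.reverse)

-- ===== PRECONDITION & SPEC =====
def Spec_get_pins (observed : String) (out : List String) : Prop := out = get_pins_alt observed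
instance (observed : String) (out : List String) : Decidable (Spec_get_pins observed out) := by unfold Spec_get_pins; infer_instance

-- ===== CLAIM (what is proved, stated in full; the proofs are below) =====
def Claim_equal_get_pins : Prop := ∀ (observed : String), Dom_get_pins observed → Spec_get_pins observed (get_pins observed)

-- ===== LEMMAS AND PROOFS =====

-- B's inner loop as a foldr (foldl over reverse = foldr)
def decF (lists : List (List String)) (i : Nat) : Nat × List String :=
  List.foldr
    (fun l st => (st.1 / l.length, st.2 ++ [l.getD (st.1 % l.length) ""]))
    (i, []) lists

def prodLens (lists : List (List String)) : Nat := (lists.map List.length).prod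

theorem foldl_mul_len (lists : List (List String)) (a : Nat) :
    lists.foldl (fun t l => t * l.length) a = a * prodLens lists := by
  induction lists generalizing a with
  | nil => simp [prodLens]
  | cons l rest ih =>
    simp [List.foldl_cons, ih, prodLens, List.map_cons, List.prod_cons]
    ring

theorem decF_cons (l : List String) (rest : List (List String)) (i : Nat) :
    decF (l :: rest) i
      = ((decF rest i).1 / l.length,
         (decF rest i).2 ++ [l.getD ((decF rest i).1 % l.length) ""]) := rfl

theorem prodLens_cons (l : List String) (rest : List (List String)) :
    prodLens (l :: rest) = l.length * prodLens rest := by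
  simp [prodLens, List.map_cons, List.prod_cons]

theorem decF_fst (lists : List (List String)) (i : Nat) :
    (decF lists i).1 = i / prodLens lists := by
  induction lists with
  | nil => simp [decF, prodLens]
  | cons l rest ih =>
    rw [decF_cons, prodLens_cons]
    simp only
    rw [ih, Nat.div_div_eq_div_mul, Nat.mul_comm]

theorem decF_snd_mod (lists : List (List String)) (i j : Nat)
    (h : i % prodLens lists = j % prodLens lists) :
    (decF lists i).2 = (decF lists j).2 := by
  induction lists generalizing i j with
  | nil => simp [decF]
  | cons l rest ih =>
    have hrest : i % prodLens rest = j % prodLens rest := by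
      have hd : prodLens rest ∣ prodLens (l :: rest) :=
        ⟨l.length, by rw [prodLens_cons]; ring⟩
      calc i % prodLens rest = i % prodLens (l :: rest) % prodLens rest :=
            (Nat.mod_mod_of_dvd i hd).symm
        _ = j % prodLens (l :: rest) % prodLens rest := by rw [h]
        _ = j % prodLens rest := Nat.mod_mod_of_dvd j hd
    have hdiv : (i / prodLens rest) % l.length = (j / prodLens rest) % l.length := by
      have e1 : i % (prodLens rest * l.length) / prodLens rest = i / prodLens rest % l.length :=
        Nat.mod_mul_right_div_self i (prodLens rest) l.length
      have e2 : j % (prodLens rest * l.length) / prodLens rest = j / prodLens rest % l.length :=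
        Nat.mod_mul_right_div_self j (prodLens rest) l.length
      have hc : prodLens rest * l.length = prodLens (l :: rest) := by
        rw [prodLens_cons]; ring
      rw [← e1, ← e2, hc, h]
    rw [decF_cons, decF_cons]
    simp only
    rw [ih i j hrest, decF_fst, decF_fst, hdiv]

theorem pyJoin_cons (x : String) (l : List String) : pyJoin (x :: l) = x ++ pyJoin l := by
  have h : ∀ (l : List String) (a : String), l.foldl (· ++ ·) a = a ++ l.foldl (· ++ ·) "" := by
    intro l
    induction l with
    | nil => intro a; simp [List.foldl]
    | cons y ys ih =>
      intro a
      simp only [List.foldl_cons]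
      rw [ih (a ++ y), ih ("" ++ y)]
      simp [String.append_assoc]
  simp only [pyJoin, List.foldl_cons]
  rw [h _ ("" ++ x)]
  simp

theorem map_getD_range (l : List String) :
    (List.range l.length).map (fun q => l.getD q "") = l := by
  apply List.ext_getElem
  · simp
  · intro i h1 h2
    simp [List.getD_eq_getElem?_getD, h2]

theorem range_mul_flatMap (a b : Nat) :
    List.range (a * b) = (List.range a).flatMap (fun q => (List.range b).map (fun r => q * b + r)) := by
  induction a with
  | zero => simp
  | succ n ih =>
    rw [Nat.succ_mul, List.range_add, ih, List.range_succ, List.flatMap_append]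
    simp [Nat.mul_comm]

theorem pos_prodLens (lists : List (List String)) (hpos : ∀ l ∈ lists, 0 < l.length) :
    0 < prodLens lists := by
  induction lists with
  | nil => simp [prodLens]
  | cons l rest ih =>
    simp only [prodLens, List.map_cons, List.prod_cons]
    exact Nat.mul_pos (hpos l (by simp)) (ih (fun x hx => hpos x (by simp [hx])))

-- the heart: index decoding over range(total) equals join of the product
theorem decode_eq_product (lists : List (List String))
    (hpos : ∀ l ∈ lists, 0 < l.length) :
    (List.range (prodLens lists)).map (fun i => pyJoin (decF lists i).2.reverse)
      = (pyProduct lists).map pyJoin := by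
  induction lists with
  | nil => simp [prodLens, decF, pyProduct]
  | cons l rest ih =>
    have hQ : 0 < prodLens rest :=
      pos_prodLens rest (fun x hx => hpos x (by simp [hx]))
    have hlen : 0 < l.length := hpos l (by simp)
    have hP : prodLens (l :: rest) = l.length * prodLens rest := by
      simp [prodLens, List.map_cons, List.prod_cons]
    rw [hP, range_mul_flatMap, List.map_flatMap]
    have key : ∀ q < l.length,
        ((List.range (prodLens rest)).map (fun r => q * prodLens rest + r)).map
            (fun i => pyJoin (decF (l :: rest) i).2.reverse)
          = ((pyProduct rest).map pyJoin).map (fun s => l.getD q "" ++ s) := by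
      intro q hq
      rw [← ih (fun x hx => hpos x (by simp [hx]))]
      rw [List.map_map, List.map_map]
      apply List.map_congr_left
      intro r hr
      rw [List.mem_range] at hr
      simp only [Function.comp]
      have hi : q * prodLens rest + r = r + q * prodLens rest := by ring
      have h2 : (decF rest (q * prodLens rest + r)).2 = (decF rest r).2 := by
        apply decF_snd_mod
        rw [hi, Nat.add_mul_mod_self_right]
      have h1 : (decF rest (q * prodLens rest + r)).1 % l.length = q := by
        rw [decF_fst, hi, Nat.add_mul_div_right _ _ hQ, Nat.div_eq_of_lt hr,
          Nat.zero_add, Nat.mod_eq_of_lt hq]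
      have hsnd : (decF (l :: rest) (q * prodLens rest + r)).2
          = (decF rest r).2 ++ [l.getD q ""] := by
        rw [decF_cons]
        simp only
        rw [h2, h1]
      rw [hsnd, List.reverse_append, List.reverse_singleton, List.singleton_append,
        pyJoin_cons]
    -- rewrite each flatMap component via key
    have lhs_eq :
        (List.range l.length).flatMap (fun q =>
          ((List.range (prodLens rest)).map (fun r => q * prodLens rest + r)).map
            (fun i => pyJoin (decF (l :: rest) i).2.reverse))
        = (List.range l.length).flatMap (fun q =>
            ((pyProduct rest).map pyJoin).map (fun s => l.getD q "" ++ s)) := by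
      apply List.flatMap_congr  -- may not exist; fallback below
      intro q hq
      exact key q (List.mem_range.mp hq)
    rw [lhs_eq]
    -- RHS
    rw [pyProduct]
    conv_rhs => rw [← map_getD_range l]
    rw [List.flatMap_map, List.map_flatMap]
    apply List.flatMap_congr
    intro q hq
    rw [List.map_map, List.map_map]
    apply List.map_congr_left
    intro t ht
    simp [Function.comp, pyJoin_cons]

set_option maxHeartbeats 1000000 in
theorem stepVar_adjB (vs : List (List String)) (c : Char) :
    stepVar vs c = vs ++ (adjB c).toList := by
  unfold stepVar adjB
  split_ifs <;> simp

theorem adjB_space : adjB ' ' = none := rfl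

theorem adjB_pos (c : Char) (l : List String) (h : adjB c = some l) : 0 < l.length := by
  unfold adjB at h
  split_ifs at h <;> cases h <;> simp

-- A's elif-chain accumulation equals filterMap adjB
theorem varAcc_eq (xs : List Char) (acc : List (List String)) :
    xs.foldl stepVar acc = acc ++ xs.filterMap adjB := by
  induction xs generalizing acc with
  | nil => simp
  | cons c cs ih =>
    rw [List.foldl_cons, stepVar_adjB, ih, List.filterMap_cons]
    cases h : adjB c <;> simp

-- filtering spaces does not change filterMap adjB (adjB ' ' = none)
theorem filter_space_filterMap (xs : List Char) :
    (xs.filter (fun x => x ≠ ' ')).filterMap adjB = xs.filterMap adjB := by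
  simp only [ne_eq, decide_not]
  induction xs with
  | nil => rfl
  | cons c cs ih =>
    by_cases h : c = ' '
    · subst h
      simp [adjB_space, ih]
    · simp only [List.filter_cons, h, decide_false, Bool.not_false, if_true,
        List.filterMap_cons, ih]

-- the else-branch accumulation: foldl append = map
theorem foldl_append_map (xs : List (List String)) (acc : List String) :
    xs.foldl (fun pins item => pins ++ [pyJoin item]) acc = acc ++ xs.map pyJoin := by
  induction xs generalizing acc with
  | nil => simp
  | cons x t ih => simp [List.foldl_cons, ih]

theorem flatten_map_singleton {α : Type} (xs : List α) :
    (List.map (fun x => [x]) xs).flatten = xs := by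
  induction xs with
  | nil => rfl
  | cons x t ih => simp [ih]

-- ===== VERDICT (by name: the statement is the Claim_ definition above) =====
theorem get_pins_spec : Claim_equal_get_pins := by
  intro observed _
  unfold Spec_get_pins
  simp only [get_pins, get_pins_alt]
  rw [varAcc_eq, filter_space_filterMap, List.nil_append]
  set V := observed.toList.filterMap adjB with hV
  have hpos : ∀ l ∈ V, 0 < l.length := by
    intro l hl
    rw [hV, List.mem_filterMap] at hl
    obtain ⟨c, _, hc⟩ := hl
    exact adjB_pos c l hc
  have hB : (List.range (V.foldl (fun t l => t * l.length) 1)).map (fun i =>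
      pyJoin ((V.reverse.foldl (fun (st : Nat × List String) l =>
        (st.1 / l.length, st.2 ++ [l.getD (st.1 % l.length) ""])) (i, [])).2).reverse)
      = (pyProduct V).map pyJoin := by
    rw [foldl_mul_len, Nat.one_mul]
    have : ∀ i, (V.reverse.foldl (fun (st : Nat × List String) l =>
        (st.1 / l.length, st.2 ++ [l.getD (st.1 % l.length) ""])) (i, [])) = decF V i := by
      intro i; rw [List.foldl_reverse]; rfl
    simp only [this]
    exact decode_eq_product V hpos
  rw [hB]
  rw [foldl_append_map, List.nil_append]
  split_ifs with h
  · obtain ⟨v, hv⟩ := List.length_eq_one_iff.mp h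
    rw [hv]
    simp [pyProduct, List.flatMap, Function.comp_def, pyJoin, flatten_map_singleton]
  · rfl
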